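-- pv_equiv track=rewrite | github.com/pvmihov/Pit | main.py | get_folder
-- ===== SOURCE A (Python) =====
-- def get_folder(file_name):
--     #receives the name of a file, and returns what folder its in
--     slash = -1
--     for i in range(0,len(file_name)):
--         if file_name[i]=='/': slash=i
--     if slash == -1: return '.'
--     par_name=''
--     for i in range(0,slash): par_name+=file_name[i]
--     return par_name
-- ===== SOURCE B (Python) =====
-- def get_folder(file_name):
--     #split into segments; folder = every segment but the last, rejoined
--     parts = file_name.split('/')
--     if len(parts) == 1:
--         return '.'
--     return '/'.join(parts[:-1])
-- ===== Notes on version B (the rewrite author's own statement) =====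
-- stated objective: idiomatic
-- what changed: Replaces the index-tracking scan for the last slash plus a character-by-character prefix rebuild with split('/') into segments and '/'.join of all segments but the last.
import Mathlib
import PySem

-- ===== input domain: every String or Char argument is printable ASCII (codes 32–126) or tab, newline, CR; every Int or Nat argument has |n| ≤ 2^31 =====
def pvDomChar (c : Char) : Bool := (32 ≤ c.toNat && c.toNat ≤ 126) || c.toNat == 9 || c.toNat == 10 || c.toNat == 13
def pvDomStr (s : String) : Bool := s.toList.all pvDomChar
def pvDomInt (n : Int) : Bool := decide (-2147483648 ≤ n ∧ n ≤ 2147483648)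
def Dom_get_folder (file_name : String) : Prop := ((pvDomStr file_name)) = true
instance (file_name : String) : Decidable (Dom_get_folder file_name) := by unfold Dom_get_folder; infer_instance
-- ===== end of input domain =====

-- B replaces A's index-tracking last-slash scan + char-by-char prefix rebuild with split('/') and a join of all segments but the last (idiomatic; same cost).

-- ===== PORT A =====
-- A's first loop: track the index of the last '/' seen (Python string = list of chars;
-- file_name[i] is always in range here, so pyGetD with a dummy default is exact).
def lastSlashFold (cs : List Char) : Int :=
  (PySem.List.pyRange 0 (PySem.List.len cs)).foldl
    (fun slash i => if PySem.List.pyGetD cs i ' ' = '/' then i else slash) (-1)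

-- A's second loop: par_name += file_name[i] for i in range(0, slash), accumulated as a char list.
def buildPrefix (cs : List Char) (slash : Int) : List Char :=
  (PySem.List.pyRange 0 slash).foldl (fun par i => par ++ [PySem.List.pyGetD cs i ' ']) []

def get_folder (file_name : String) : String :=
  let cs := file_name.toList
  let slash := lastSlashFold cs
  if slash = -1 then "."
  else String.ofList (buildPrefix cs slash)

-- ===== PORT B =====
def get_folder_alt (file_name : String) : String :=
  let parts := (PySem.Str.split? file_name "/").getD []  -- sep "/" is nonempty, so split? is always `some`
  if parts.length = 1 then "."
  else PySem.Str.join "/" (PySem.List.slice parts none (some (-1)))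

-- ===== PRECONDITION & SPEC =====
def Spec_get_folder (file_name : String) (out : String) : Prop := out = get_folder_alt file_name
instance (file_name : String) (out : String) : Decidable (Spec_get_folder file_name out) := by unfold Spec_get_folder; infer_instance

-- ===== CLAIM (what is proved, stated in full; the proofs are below) =====
def Claim_equal_get_folder : Prop := ∀ (file_name : String), Dom_get_folder file_name → Spec_get_folder file_name (get_folder file_name)

-- ===== LEMMAS AND PROOFS =====

-- proof-side spec: prefix before the LAST '/', none if there is no '/'
def flast : List Char → Option (List Char)
  | [] => none
  | c :: cs =>
    match flast cs with
    | some p => some (c :: p)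
    | none => if c = '/' then some [] else none

-- structural recurrence equivalent of Chars.splitOn · ['/']
def spSplit : List Char → List (List Char)
  | [] => [[]]
  | c :: cs => if c = '/' then [] :: spSplit cs else (spSplit cs).modifyHead (c :: ·)

theorem foldl_snoc_eq (l : List Char) : ∀ init : List Char,
    l.foldl (fun acc c => acc ++ [c]) init = init ++ l := by
  induction l with
  | nil => simp
  | cons c cs ih => intro init; simp [List.foldl_cons, ih]

theorem go_spec : ∀ (fuel : Nat) (l cur : List Char) (acc : List (List Char)), l.length ≤ fuel →
    PySem.Chars.splitOn.go ['/'] fuel l cur acc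
      = acc.reverse ++ (spSplit l).modifyHead (fun x => cur.reverse ++ x) := by
  intro fuel
  induction fuel with
  | zero =>
    intro l cur acc h
    have hl : l = [] := by cases l <;> simp_all
    subst hl
    rw [PySem.Chars.splitOn.go]
    simp [spSplit]
  | succ n ih =>
    intro l cur acc h
    cases l with
    | nil =>
      rw [PySem.Chars.splitOn.go] <;> simp [spSplit]
    | cons c rest =>
      rw [PySem.Chars.splitOn.go]
      have hr : rest.length ≤ n := by simp at h; omega
      rw [show ((['/'] : List Char).isPrefixOf (c :: rest)) = ('/' == c) from by
        simp [List.isPrefixOf]]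
      by_cases hc : c = '/'
      · subst hc
        rw [if_pos (show (('/' : Char) == '/') = true from by rfl)]
        have hd : List.drop (['/'] : List Char).length ('/' :: rest) = rest := by simp
        rw [hd, ih rest [] (cur.reverse :: acc) hr]
        simp only [spSplit, if_pos rfl]
        cases hsp : spSplit rest <;> simp
      · have hcb : ¬ ((('/' : Char) == c) = true) := by
          simp only [beq_iff_eq]
          exact fun hx => hc hx.symm
        rw [if_neg hcb]
        rw [ih rest (c :: cur) acc hr]
        simp only [spSplit, if_neg hc]
        cases hsp : spSplit rest <;> simp

theorem splitOn_eq_spSplit (cs : List Char) : PySem.Chars.splitOn cs ['/'] = spSplit cs := by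
  rw [PySem.Chars.splitOn, go_spec (cs.length + 1) cs [] [] (by omega)]
  cases hsp : spSplit cs <;> simp

theorem join_cons_head (c : Char) (y : List Char) (t : List (List Char)) :
    PySem.Chars.join ['/'] ((c :: y) :: t) = c :: PySem.Chars.join ['/'] (y :: t) := by
  cases t with
  | nil => simp [PySem.Chars.join_singleton]
  | cons z r => rw [PySem.Chars.join_cons_cons, PySem.Chars.join_cons_cons]; simp

theorem join_slash_head (y : List Char) (t : List (List Char)) :
    PySem.Chars.join ['/'] ([] :: y :: t) = '/' :: PySem.Chars.join ['/'] (y :: t) := by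
  rw [PySem.Chars.join_cons_cons]; simp

theorem sp_flast : ∀ cs : List Char,
    (flast cs = none ∧ spSplit cs = [cs]) ∨
    (∃ p, flast cs = some p ∧ 2 ≤ (spSplit cs).length ∧
      PySem.Chars.join ['/'] (spSplit cs).dropLast = p) := by
  intro cs
  induction cs with
  | nil => exact Or.inl ⟨rfl, rfl⟩
  | cons c cs ih =>
    by_cases hc : c = '/'
    · subst hc
      rcases ih with ⟨hf, hs⟩ | ⟨p, hf, hlen, hj⟩
      · exact Or.inr ⟨[], by simp [flast, hf], by simp [spSplit, hs, PySem.Chars.join_singleton]⟩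
      · cases hsp : spSplit cs with
        | nil => rw [hsp] at hlen; simp at hlen
        | cons y t =>
          cases t with
          | nil => rw [hsp] at hlen; simp at hlen
          | cons z r =>
            refine Or.inr ⟨'/' :: p, by simp [flast, hf], ?_, ?_⟩
            · simp [spSplit, hsp]
            · rw [hsp] at hj
              have hs2 : spSplit ('/' :: cs) = [] :: y :: z :: r := by simp [spSplit, hsp]
              rw [hs2, List.dropLast_cons₂, List.dropLast_cons₂, join_slash_head]
              rw [List.dropLast_cons₂] at hj
              rw [hj]
    · rcases ih with ⟨hf, hs⟩ | ⟨p, hf, hlen, hj⟩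
      · refine Or.inl ⟨by simp [flast, hf, hc], by simp [spSplit, hc, hs]⟩
      · cases hsp : spSplit cs with
        | nil => rw [hsp] at hlen; simp at hlen
        | cons y t =>
          cases t with
          | nil => rw [hsp] at hlen; simp at hlen
          | cons z r =>
            refine Or.inr ⟨c :: p, by simp [flast, hf], ?_, ?_⟩
            · simp [spSplit, hc, hsp]
            · rw [hsp] at hj
              have hs2 : spSplit (c :: cs) = (c :: y) :: z :: r := by simp [spSplit, hc, hsp]
              rw [hs2, List.dropLast_cons₂, join_cons_head]
              rw [List.dropLast_cons₂] at hj
              rw [hj]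

theorem flast_prefix : ∀ (cs p : List Char), flast cs = some p → p <+: cs := by
  intro cs
  induction cs with
  | nil => intro p h; simp [flast] at h
  | cons c cs ih =>
    intro p h
    simp only [flast] at h
    cases hf : flast cs with
    | some q =>
      rw [hf] at h
      simp only [Option.some.injEq] at h
      subst h
      exact List.cons_prefix_cons.mpr ⟨rfl, ih q hf⟩
    | none =>
      rw [hf] at h
      by_cases hc : c = '/'
      · rw [if_pos hc] at h
        cases h
        exact List.nil_prefix
      · rw [if_neg hc] at h
        cases h

theorem flast_snoc (ds : List Char) (c : Char) :
    flast (ds ++ [c]) = if c = '/' then some ds else flast ds := by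
  induction ds with
  | nil => simp [flast]
  | cons d ds ih =>
    by_cases hc : c = '/'
    · subst hc
      cases hfd : flast ds <;> simp [flast, ih, hfd]
    · cases hfd : flast ds <;> simp [flast, ih, hfd, hc]

theorem lastSlashFold_snoc (ds : List Char) (c : Char) :
    lastSlashFold (ds ++ [c]) = if c = '/' then (ds.length : Int) else lastSlashFold ds := by
  unfold lastSlashFold
  have h1 : PySem.List.len (ds ++ [c]) = (ds.length : Int) + 1 := by
    simp [PySem.List.len]
  have hrange : PySem.List.pyRange ((ds.length : Int)) ((ds.length : Int) + 1)
      = [((ds.length : Nat) : Int)] := by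
    rw [PySem.List.pyRange_one_cons (by omega), PySem.List.pyRange_one_eq_nil (by omega)]
  have hcongr : List.foldl (fun slash i => if PySem.List.pyGetD (ds ++ [c]) i ' ' = '/' then i else slash)
      (-1) (PySem.List.pyRange 0 (ds.length : Int))
      = List.foldl (fun slash i => if PySem.List.pyGetD ds i ' ' = '/' then i else slash)
      (-1) (PySem.List.pyRange 0 (ds.length : Int)) := by
    apply PySem.List.foldl_congr_mem
    intro acc x hx
    rw [PySem.List.mem_pyRange_one] at hx
    obtain ⟨k, rfl⟩ : ∃ k : Nat, x = (k : Int) := ⟨x.toNat, by omega⟩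
    have hk : k < ds.length := by exact_mod_cast hx.2
    rw [PySem.List.pyGetD_natCast, PySem.List.pyGetD_natCast]
    rw [List.getD_eq_getElem?_getD, List.getD_eq_getElem?_getD,
      List.getElem?_append_left hk]
  have hlast : PySem.List.pyGetD (ds ++ [c]) ((ds.length : Nat) : Int) ' ' = c := by
    rw [PySem.List.pyGetD_natCast, List.getD_eq_getElem?_getD]
    simp
  rw [h1, PySem.List.pyRange_one_append 0 (ds.length : Int) ((ds.length : Int) + 1)
      (Int.natCast_nonneg _) (by omega), List.foldl_append, hrange, hcongr]
  simp only [List.foldl_cons, List.foldl_nil]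
  rw [hlast]
  by_cases hc : c = '/' <;> simp [hc, PySem.List.len]

theorem lastSlashFold_spec : ∀ cs : List Char,
    (flast cs = none ∧ lastSlashFold cs = -1) ∨
    (∃ p, flast cs = some p ∧ lastSlashFold cs = (p.length : Int)) := by
  intro cs
  induction cs using List.reverseRecOn with
  | nil =>
    refine Or.inl ⟨rfl, ?_⟩
    unfold lastSlashFold
    rw [show PySem.List.len ([] : List Char) = 0 from rfl,
      PySem.List.pyRange_one_eq_nil (by omega)]
    rfl
  | append_singleton ds c ih =>
    rw [flast_snoc, lastSlashFold_snoc]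
    by_cases hc : c = '/'
    · exact Or.inr ⟨ds, by simp [hc], by simp [hc]⟩
    · simp only [if_neg hc]
      exact ih

theorem buildPrefix_spec (cs p : List Char) (hp : p <+: cs) :
    buildPrefix cs ((p.length : Nat) : Int) = p := by
  unfold buildPrefix
  obtain ⟨t, rfl⟩ := hp
  have hcongr : List.foldl (fun par i => par ++ [PySem.List.pyGetD (p ++ t) i ' '])
      ([] : List Char) (PySem.List.pyRange 0 (p.length : Int))
      = List.foldl (fun par i => par ++ [PySem.List.pyGetD p i ' '])
      ([] : List Char) (PySem.List.pyRange 0 (p.length : Int)) := by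
    apply PySem.List.foldl_congr_mem
    intro acc x hx
    rw [PySem.List.mem_pyRange_one] at hx
    obtain ⟨k, rfl⟩ : ∃ k : Nat, x = (k : Int) := ⟨x.toNat, by omega⟩
    have hk : k < p.length := by exact_mod_cast hx.2
    rw [PySem.List.pyGetD_natCast, PySem.List.pyGetD_natCast,
      List.getD_eq_getElem?_getD, List.getD_eq_getElem?_getD,
      List.getElem?_append_left hk]
  rw [hcongr]
  have := PySem.List.foldl_pyRange_pyGetD p ' ' (fun par c => par ++ [c]) ([] : List Char)
    (a := 0) (by omega)
  rw [show PySem.List.len p = (p.length : Int) from rfl] at this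
  rw [this]
  have h0 : List.drop (Int.toNat 0) p = p := by simp
  rw [h0, foldl_snoc_eq]
  simp

theorem slice_neg_one {α : Type} (xs : List α) :
    PySem.List.slice xs none (some (-1)) = xs.dropLast := by
  simp only [PySem.List.slice, PySem.List.clampIdx]
  split_ifs <;> (rw [List.dropLast_eq_take]; congr 1 <;> omega)

-- ===== VERDICT (by name: the statement is the Claim_ definition above) =====
theorem get_folder_spec : Claim_equal_get_folder := by
  unfold Claim_equal_get_folder Spec_get_folder
  intro fn _
  simp only [get_folder, get_folder_alt]
  have hsplit : (PySem.Str.split? fn "/").getD [] = (spSplit fn.toList).map String.ofList := by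
    rw [show (PySem.Str.split? fn "/")
        = some (List.map String.ofList (PySem.Chars.splitOn fn.toList ['/'])) from by
      simp [PySem.Str.split?, PySem.Chars.split?]]
    simp [splitOn_eq_spSplit]
  rw [hsplit]
  rcases sp_flast fn.toList with ⟨hf, hs⟩ | ⟨p, hf, hlen, hj⟩
  · rcases lastSlashFold_spec fn.toList with ⟨_, hS⟩ | ⟨q, hf', _⟩
    · simp [hS, hs]
    · rw [hf] at hf'; cases hf'
  · rcases lastSlashFold_spec fn.toList with ⟨hf', _⟩ | ⟨q, hf', hS⟩
    · rw [hf] at hf'; cases hf'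
    · rw [hf] at hf'
      obtain rfl : q = p := by injection hf' with h; exact h.symm
      have hne : ¬(lastSlashFold fn.toList = -1) := by rw [hS]; omega
      rw [if_neg hne, hS]
      have hlen2 : ¬((spSplit fn.toList).map String.ofList).length = 1 := by
        simp only [List.length_map]; omega
      rw [if_neg hlen2, slice_neg_one, ← List.map_dropLast]
      rw [buildPrefix_spec _ _ (flast_prefix _ _ hf)]
      rw [PySem.Str.join]
      congr 1
      rw [show ("/" : String).toList = ['/'] from rfl, List.map_map,
        show (String.toList ∘ String.ofList) = id from funext fun l => String.toList_ofList,
        List.map_id, hj]
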